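-- pv_equiv track=rewrite | github.com/BarryMcAdams/AutoCAD_MCP | src/mcp_interface/research_algorithm_generator.py | _is_latex_notation
-- ===== SOURCE A (Python) =====
-- def _is_latex_notation(notation: str) -> bool:
--     """
--     Detect if input is in LaTeX mathematical notation.
--
--     Args:
--         notation: Input mathematical description
--
--     Returns:
--         Boolean indicating LaTeX notation
--     """
--     # Look for LaTeX-specific markers
--     latex_markers = [
--         r'\begin{equation}',
--         r'\frac',
--         r'\sum',
--         r'\int',
--         r'\prod'
--     ]
--
--     return any(marker in notation for marker in latex_markers)
-- ===== SOURCE B (Python) =====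
-- def _is_latex_notation(notation: str) -> bool:
--     """Single left-to-right scan: at each backslash, test whether a marker body follows."""
--     marker_bodies = ('begin{equation}', 'frac', 'sum', 'int', 'prod')
--     for i, ch in enumerate(notation):
--         if ch == '\\' and notation.startswith(marker_bodies, i + 1):
--             return True
--     return False
-- ===== Notes on version B (the rewrite author's own statement) =====
-- stated objective: alternative
-- what changed: Replaced the five independent per-marker substring scans by one left-to-right pass that, at each backslash character, tests whether one of the marker bodies follows at that offset (str.startswith with a tuple).
import Mathlib
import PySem

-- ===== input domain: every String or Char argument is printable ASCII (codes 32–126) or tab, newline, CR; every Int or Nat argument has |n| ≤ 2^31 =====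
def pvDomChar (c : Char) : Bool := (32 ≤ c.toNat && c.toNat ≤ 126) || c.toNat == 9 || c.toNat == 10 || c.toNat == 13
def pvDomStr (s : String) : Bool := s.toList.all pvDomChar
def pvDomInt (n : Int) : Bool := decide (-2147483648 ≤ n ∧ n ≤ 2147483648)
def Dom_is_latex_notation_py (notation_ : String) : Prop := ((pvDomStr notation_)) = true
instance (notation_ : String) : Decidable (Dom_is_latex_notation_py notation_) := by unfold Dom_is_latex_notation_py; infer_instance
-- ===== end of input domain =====

-- B replaces five independent substring scans by one left-to-right pass that tests marker bodies at each backslash (alternative decomposition, same behaviour).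


-- ===== PORT A =====
-- any(marker in notation for marker in latex_markers)
def is_latex_notation_py (notation_ : String) : Bool :=
  ["\\begin{equation}", "\\frac", "\\sum", "\\int", "\\prod"].any
    (fun marker => PySem.Str.isIn marker notation_)

-- ===== PORT B =====
-- the tuple of marker bodies (markers without their leading backslash)
def pvMarkerBodies : List (List Char) :=
  ["begin{equation}".toList, "frac".toList, "sum".toList, "int".toList, "prod".toList]

-- the loop of B: walk the characters; at a backslash, test each marker body against the rest
def pvScan (cs : List Char) : Bool :=
  match cs with
  | [] => false
  | c :: rest =>
    if c == '\\' && pvMarkerBodies.any (fun m => PySem.Chars.startswith rest m) then true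
    else pvScan rest

def is_latex_notation_py_alt (notation_ : String) : Bool := pvScan notation_.toList

-- ===== PRECONDITION & SPEC =====
def Spec_is_latex_notation_py (notation_ : String) (out : Bool) : Prop := out = is_latex_notation_py_alt notation_
instance (notation_ : String) (out : Bool) : Decidable (Spec_is_latex_notation_py notation_ out) := by unfold Spec_is_latex_notation_py; infer_instance

-- ===== CLAIM (what is proved, stated in full; the proofs are below) =====
def Claim_equal_is_latex_notation_py : Prop := ∀ (notation_ : String), Dom_is_latex_notation_py notation_ → Spec_is_latex_notation_py notation_ (is_latex_notation_py notation_)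

-- ===== LEMMAS AND PROOFS =====

-- B's scan finds exactly the suffixes that begin with a backslash followed by a marker body
theorem pvScan_iff (cs : List Char) :
    pvScan cs = true ↔ ∃ m ∈ pvMarkerBodies, ('\\' :: m) <:+: cs := by
  induction cs with
  | nil => simp [pvScan]
  | cons c rest ih =>
    simp only [pvScan, List.infix_cons_iff]
    constructor
    · intro h
      split at h
      · rename_i hc
        simp only [Bool.and_eq_true, beq_iff_eq, List.any_eq_true] at hc
        obtain ⟨hc1, m, hm, hsw⟩ := hc
        exact ⟨m, hm, Or.inl (by
          rw [hc1]
          exact (List.cons_prefix_cons).mpr ⟨rfl, (PySem.Chars.startswith_iff rest m).mp hsw⟩)⟩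
      · obtain ⟨m, hm, hinf⟩ := ih.mp h
        exact ⟨m, hm, Or.inr hinf⟩
    · rintro ⟨m, hm, hpre | hinf⟩
      · obtain ⟨hc, hpre'⟩ := (List.cons_prefix_cons).mp hpre
        have : (c == '\\' && pvMarkerBodies.any (fun m => PySem.Chars.startswith rest m)) = true := by
          simp only [Bool.and_eq_true, beq_iff_eq, List.any_eq_true]
          exact ⟨hc.symm, m, hm, (PySem.Chars.startswith_iff rest m).mpr hpre'⟩
        simp [this]
      · have := ih.mpr ⟨m, hm, hinf⟩
        split <;> simp [this]

-- ===== VERDICT (by name: the statement is the Claim_ definition above) =====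
theorem is_latex_notation_py_spec : Claim_equal_is_latex_notation_py := by
  intro s _
  unfold Spec_is_latex_notation_py
  rw [Bool.eq_iff_iff]
  rw [show is_latex_notation_py_alt s = pvScan s.toList from rfl, pvScan_iff]
  simp only [is_latex_notation_py, List.any_eq_true, PySem.Str.isIn_iff_infix,
    List.mem_cons, pvMarkerBodies]
  constructor
  · rintro ⟨m, hm, hinf⟩
    rcases hm with rfl | rfl | rfl | rfl | rfl | h
    · exact ⟨"begin{equation}".toList, by simp, hinf⟩
    · exact ⟨"frac".toList, by simp, hinf⟩
    · exact ⟨"sum".toList, by simp, hinf⟩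
    · exact ⟨"int".toList, by simp, hinf⟩
    · exact ⟨"prod".toList, by simp, hinf⟩
    · cases h
  · rintro ⟨m, hm, hinf⟩
    rcases hm with rfl | rfl | rfl | rfl | rfl | h
    · exact ⟨"\\begin{equation}", by simp, hinf⟩
    · exact ⟨"\\frac", by simp, hinf⟩
    · exact ⟨"\\sum", by simp, hinf⟩
    · exact ⟨"\\int", by simp, hinf⟩
    · exact ⟨"\\prod", by simp, hinf⟩
    · cases h
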